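-- pv_equiv track=rewrite | github.com/Anony-code/MPI | src/mplKD.py | return_new_neg
-- ===== SOURCE A (Python) =====
-- def return_new_neg(spe_neg_, new_fre):
--     temp_list = []
--     temp = []
--     for item in spe_neg_:
--         for ie in item:
--             if ie in new_fre.keys():
--                 temp.append(ie)
--         temp_list.append(len(temp))
--         temp = []
--     t_m = min(temp_list)
--
--     li = []
--     li_l = []
--     for item in spe_neg_:
--         for ie in item:
--             if ie in new_fre.keys() and len(li_l) < t_m:
--                 li_l.append(ie)
--         li.append(li_l)
--         li_l = []
--     return li
-- ===== SOURCE B (Python) =====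
-- def return_new_neg(spe_neg_, new_fre):
--     keys = set(new_fre)
--     out = []
--     t_m = None
--     for item in spe_neg_:
--         f = [ie for ie in item if ie in keys]
--         if t_m is None or len(f) < t_m:
--             t_m = len(f)
--             out = [g[:t_m] for g in out]
--         out.append(f[:t_m])
--     return out
-- ===== Notes on version B (the rewrite author's own statement) =====
-- stated objective: alternative
-- what changed: B is a single online pass with a running minimum: it filters each sublist once against a prebuilt key set, truncates it to the current minimum as it is appended, and retro-truncates the already-built output whenever a new smaller minimum appears, instead of A's two full passes over spe_neg_ (count pass + guarded-accumulator rebuild pass) each re-testing dict membership.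
import Mathlib
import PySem

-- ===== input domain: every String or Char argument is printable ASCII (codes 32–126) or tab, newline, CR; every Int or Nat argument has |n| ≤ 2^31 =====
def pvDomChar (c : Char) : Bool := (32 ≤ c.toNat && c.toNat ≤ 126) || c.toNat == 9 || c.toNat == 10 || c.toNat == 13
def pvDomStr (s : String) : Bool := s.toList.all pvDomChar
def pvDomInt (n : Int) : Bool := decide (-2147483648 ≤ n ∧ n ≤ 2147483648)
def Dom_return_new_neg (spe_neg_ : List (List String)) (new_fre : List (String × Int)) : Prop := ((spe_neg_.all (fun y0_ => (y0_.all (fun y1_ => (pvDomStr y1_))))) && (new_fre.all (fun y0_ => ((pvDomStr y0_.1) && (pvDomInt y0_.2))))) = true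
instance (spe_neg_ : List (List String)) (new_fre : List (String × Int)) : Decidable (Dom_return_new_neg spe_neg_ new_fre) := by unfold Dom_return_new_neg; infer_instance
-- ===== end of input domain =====

-- B replaces A's two filtering passes by one online pass with a running minimum that
-- retro-truncates the output when the minimum drops; equivalence proved on nonempty spe_neg_
-- (A raises ValueError from min([]) on the empty list, which Pre_ excludes; B returns [] there).


-- ===== PORT A =====
def return_new_neg (spe_neg_ : List (List String)) (new_fre : List (String × Int)) : List (List String) :=
  let temp_list : List Int := spe_neg_.foldl (fun acc item =>
    acc ++ [((item.foldl (fun temp ie =>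
        if new_fre.any (fun p => p.1 == ie) then temp ++ [ie] else temp) []).length : Int)]) []
  match PySem.List.min? temp_list (fun x => x) with
  | none => []        -- min([]) raises ValueError; excluded by Pre_
  | some t_m =>
    spe_neg_.foldl (fun li item =>
      li ++ [item.foldl (fun li_l ie =>
        if new_fre.any (fun p => p.1 == ie) && decide ((li_l.length : Int) < t_m)
        then li_l ++ [ie] else li_l) []]) []

-- ===== PORT B =====
-- one loop iteration of B: f is the current filtered sublist, st = (out, t_m)
def altStep (st : List (List String) × Option Int) (f : List String) :
    List (List String) × Option Int :=
  match st.2 with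
  | none =>
      (st.1.map (fun g => PySem.List.slice g none (some (f.length : Int)))
         ++ [PySem.List.slice f none (some (f.length : Int))], some (f.length : Int))
  | some t =>
      if (f.length : Int) < t then
        (st.1.map (fun g => PySem.List.slice g none (some (f.length : Int)))
           ++ [PySem.List.slice f none (some (f.length : Int))], some (f.length : Int))
      else
        (st.1 ++ [PySem.List.slice f none (some t)], some t)

def return_new_neg_alt (spe_neg_ : List (List String)) (new_fre : List (String × Int)) : List (List String) :=
  let keys : PySem.Set String := PySem.Set.ofList (new_fre.map Prod.fst)
  (spe_neg_.foldl (fun st item => altStep st (item.filter (fun ie => keys.contains ie)))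
    ([], none)).1

-- ===== PRECONDITION & SPEC =====
-- A raises ValueError via min(temp_list) exactly when spe_neg_ is empty; Pre_ excludes that.
def Pre_return_new_neg (spe_neg_ : List (List String)) (new_fre : List (String × Int)) : Prop := spe_neg_ ≠ []
instance (spe_neg_ : List (List String)) (new_fre : List (String × Int)) : Decidable (Pre_return_new_neg spe_neg_ new_fre) := by unfold Pre_return_new_neg; infer_instance
def pvWitness_return_new_neg : List (List String) × (List (String × Int)) := ([["a"], ["a", "b"]], [("a", 1)])
def Spec_return_new_neg (spe_neg_ : List (List String)) (new_fre : List (String × Int)) (out : List (List String)) : Prop := out = return_new_neg_alt spe_neg_ new_fre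
instance (spe_neg_ : List (List String)) (new_fre : List (String × Int)) (out : List (List String)) : Decidable (Spec_return_new_neg spe_neg_ new_fre out) := by unfold Spec_return_new_neg; infer_instance

-- ===== CLAIM (what is proved, stated in full; the proofs are below) =====
def Claim_equal_return_new_neg : Prop := ∀ (spe_neg_ : List (List String)) (new_fre : List (String × Int)), Dom_return_new_neg spe_neg_ new_fre → Pre_return_new_neg spe_neg_ new_fre → Spec_return_new_neg spe_neg_ new_fre (return_new_neg spe_neg_ new_fre)

-- ===== LEMMAS AND PROOFS =====

-- A's length-guarded accumulator loop is 'take m' of the filtered list.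
theorem guardFold (P : String → Bool) (m : Int) :
    ∀ (item : List String) (acc : List String), (acc.length : Int) ≤ m →
      item.foldl (fun l ie => if P ie && decide ((l.length : Int) < m) then l ++ [ie] else l) acc
        = (acc ++ item.filter P).take m.toNat := by
  intro item
  induction item with
  | nil =>
      intro acc h
      simp only [List.foldl_nil, List.filter_nil, List.append_nil]
      have hle : acc.length ≤ m.toNat := by omega
      exact (List.take_of_length_le hle).symm
  | cons ie rest ih =>
      intro acc h
      simp only [List.foldl_cons, List.filter_cons]
      by_cases hP : P ie
      · simp only [hP, Bool.true_and, if_pos]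
        by_cases hlen : (acc.length : Int) < m
        · simp only [hlen, decide_true, if_pos]
          rw [ih (acc ++ [ie]) (by simp; omega)]
          simp
        · simp only [hlen, decide_false, if_neg, Bool.false_eq_true, not_false_eq_true]
          rw [ih acc h]
          have hm : m.toNat ≤ acc.length := by omega
          rw [List.take_append_of_le_length hm, List.take_append_of_le_length hm]
      · simp only [hP, Bool.false_and, if_neg, Bool.false_eq_true, not_false_eq_true]
        exact ih acc h

-- B's membership test against set(new_fre) is A's 'ie in new_fre.keys()' test.
theorem setContains_eq_anyKey (new_fre : List (String × Int)) (ie : String) :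
    (PySem.Set.ofList (new_fre.map Prod.fst)).contains ie
      = new_fre.any (fun p => p.1 == ie) := by
  rcases h : new_fre.any (fun p => p.1 == ie) with _ | _
  · simp only [List.any_eq_false, beq_iff_eq] at h
    simp only [PySem.Set.contains_eq_listContains, List.contains_eq_mem, PySem.Set.mem_ofList,
      List.mem_map, decide_eq_false_iff_not]
    rintro ⟨p, hp, rfl⟩
    exact h p hp rfl
  · simp only [List.any_eq_true, beq_iff_eq] at h
    rcases h with ⟨p, hp, rfl⟩
    simp only [PySem.Set.contains_eq_listContains, List.contains_eq_mem, PySem.Set.mem_ofList,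
      List.mem_map, decide_eq_true_eq]
    exact ⟨p, hp, rfl⟩

-- Int running minimum over casted lengths is the cast of the Nat running minimum.
theorem castFoldMin (P : String → Bool) : ∀ (items : List (List String)) (a : Nat),
    (items.map (fun item => ((item.filter P).length : Int))).foldl min (a : Int)
      = ((items.foldl (fun b item => min b (item.filter P).length) a : Nat) : Int) := by
  intro items
  induction items with
  | nil => intro a; rfl
  | cons f rest ih =>
      intro a
      simp only [List.map_cons, List.foldl_cons, ← Nat.cast_min, ih]

-- step equations for altStep with slices written as List.take
theorem altStep_none (o : List (List String)) (f : List String) :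
    altStep (o, none) f
      = (o.map (fun g => g.take f.length) ++ [f], some ((f.length : Nat) : Int)) := by
  simp [altStep, PySem.List.slice_to_natCast]

theorem altStep_some (o : List (List String)) (m : Nat) (f : List String) :
    altStep (o, some ((m : Nat) : Int)) f
      = if f.length < m then
          (o.map (fun g => g.take f.length) ++ [f], some ((f.length : Nat) : Int))
        else (o ++ [f.take m], some ((m : Nat) : Int)) := by
  by_cases h : f.length < m
  · have hc : ((f.length : Int) < (m : Int)) := by exact_mod_cast h
    simp [altStep, hc, h, PySem.List.slice_to_natCast]
  · have hc : ¬ ((f.length : Int) < (m : Int)) := by exact_mod_cast h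
    simp [altStep, hc, h, PySem.List.slice_to_natCast]

-- Invariant of B's online loop: with the output so far equal to 'pre' truncated to the running
-- minimum m, folding the remaining items yields every filtered list truncated to the final minimum.
theorem B_fold_inv (P : String → Bool) :
    ∀ (items : List (List String)) (pre : List (List String)) (m : Nat),
      items.foldl (fun st item => altStep st (item.filter P))
        (pre.map (fun g => g.take m), some ((m : Nat) : Int))
      = ((pre ++ items.map (fun item => item.filter P)).map
           (fun g => g.take (items.foldl (fun b item => min b (item.filter P).length) m)),
         some ((items.foldl (fun b item => min b (item.filter P).length) m : Nat) : Int)) := by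
  intro items
  induction items with
  | nil => intro pre m; simp
  | cons it rest ih =>
      intro pre m
      simp only [List.foldl_cons, altStep_some]
      by_cases hlt : (it.filter P).length < m
      · simp only [hlt, if_pos]
        have hmap : (pre.map (fun g => g.take m)).map (fun g => g.take (it.filter P).length)
            ++ [it.filter P]
            = ((pre ++ [it.filter P]).map (fun g => g.take (it.filter P).length)) := by
          simp only [List.map_map, List.map_append, List.map_cons, List.map_nil, List.take_length]
          congr 1
          apply List.map_congr_left
          intro g _
          simp only [Function.comp_apply, List.take_take]
          rw [min_eq_left (le_of_lt hlt)]
        rw [hmap, ih (pre ++ [it.filter P]) (it.filter P).length]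
        have hmin : min m (it.filter P).length = (it.filter P).length :=
          min_eq_right (le_of_lt hlt)
        simp [hmin, List.append_assoc]
      · simp only [hlt, if_neg, not_false_eq_true]
        have hmap : pre.map (fun g => g.take m) ++ [(it.filter P).take m]
            = (pre ++ [it.filter P]).map (fun g => g.take m) := by simp
        rw [hmap, ih (pre ++ [it.filter P]) m]
        have hmin : min m (it.filter P).length = m := min_eq_left (by omega)
        simp [hmin, List.append_assoc]

-- ===== VERDICT (by name: the statement is the Claim_ definition above) =====
theorem return_new_neg_spec : Claim_equal_return_new_neg := by
  intro spe_neg_ new_fre _ hpre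
  unfold Spec_return_new_neg
  set P : String → Bool := fun ie => new_fre.any (fun p => p.1 == ie) with hP
  rcases spe_neg_ with _ | ⟨x, rest⟩
  · exact absurd rfl hpre
  set M : Nat := rest.foldl (fun b item => min b (item.filter P).length) (x.filter P).length with hM
  -- B's online pass produces the filtered sublists truncated to the overall minimum M.
  have hB : return_new_neg_alt (x :: rest) new_fre
      = ((x :: rest).map (fun item => item.filter P)).map (fun f => f.take M) := by
    simp only [return_new_neg_alt, setContains_eq_anyKey, ← hP, List.foldl_cons, altStep_none]
    have hst : ((([] : List (List String)).map (fun g => g.take (x.filter P).length)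
          ++ [x.filter P] : List (List String)), some ((((x.filter P).length : Nat)) : Int))
        = (([x.filter P]).map (fun g => g.take (x.filter P).length),
           some ((((x.filter P).length : Nat)) : Int)) := by simp
    rw [hst, B_fold_inv P rest [x.filter P] (x.filter P).length]
    simp [hM]
  rw [hB]
  -- A's two passes produce the same lists.
  simp only [return_new_neg]
  have h1 : (x :: rest).foldl (fun acc item =>
      acc ++ [((item.foldl (fun temp ie => if P ie then temp ++ [ie] else temp) []).length : Int)]) []
      = (x :: rest).map (fun item => ((item.filter P).length : Int)) := by
    simp only [PySem.List.foldl_append_if_eq_filter, List.nil_append,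
      PySem.List.foldl_append_singleton_eq_map, List.nil_append]
  rw [h1]
  have hmin : PySem.List.min? ((x :: rest).map (fun item => ((item.filter P).length : Int)))
      (fun y => y) = some ((M : Nat) : Int) := by
    simp only [List.map_cons, PySem.List.min?_id_cons]
    exact congrArg some (castFoldMin P rest (x.filter P).length)
  rw [hmin]
  have hA : (x :: rest).foldl (fun li item =>
      li ++ [item.foldl (fun li_l ie =>
        if P ie && decide ((li_l.length : Int) < ((M : Nat) : Int)) then li_l ++ [ie] else li_l) []]) []
      = ((x :: rest).map (fun item => item.filter P)).map (fun f => f.take M) := by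
    simp only [PySem.List.foldl_append_singleton_eq_map, List.nil_append, List.map_map]
    apply List.map_congr_left
    intro item _
    rw [guardFold P ((M : Nat) : Int) item [] (by simp)]
    simp [Int.toNat_natCast]
  exact hA
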